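-- pv_equiv track=rewrite | github.com/BlazarKnight/relalational-search | search.py | string_in_dataset_to_matrix
-- ===== SOURCE A (Python) =====
-- from collections import defaultdict
--
-- def string_in_dataset_to_matrix(string_in_data):
--     data_list_split = string_in_data.split()  # Split the string into a list of words
--
--     # Count the occurrences of each word in data_list_split using a defaultdict
--     word_counts = defaultdict(int)
--     for word in data_list_split:
--         word_counts[word] += 1
--
--     data_list_singal = set(data_list_split)  # Remove duplicates using a set
--     sorted_data_list = sorted(data_list_singal)  # Sort the list of unique words
--
--     matrix = [(word, word_counts[word]) for word in sorted_data_list]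
--     return dict(matrix)  # Return the matrix of word and occurrence pairs
-- ===== SOURCE B (Python) =====
-- def string_in_dataset_to_matrix(string_in_data):
--     # Sort the full word list, then scan it once: each run of equal adjacent
--     # words yields one (word, run-length) entry; keys come out sorted.
--     words = sorted(string_in_data.split())
--     result = {}
--     i = 0
--     n = len(words)
--     while i < n:
--         j = i
--         while j < n and words[j] == words[i]:
--             j += 1
--         result[words[i]] = j - i
--         i = j
--     return result
-- ===== Notes on version B (the rewrite author's own statement) =====
-- stated objective: alternative
-- what changed: Replaces the defaultdict-count / set-dedup / sort-keys / lookup pipeline by sorting the word list once and scanning it for runs of equal adjacent words, emitting (word, run length) pairs directly; no hash table of counts is maintained.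
import Mathlib
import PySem

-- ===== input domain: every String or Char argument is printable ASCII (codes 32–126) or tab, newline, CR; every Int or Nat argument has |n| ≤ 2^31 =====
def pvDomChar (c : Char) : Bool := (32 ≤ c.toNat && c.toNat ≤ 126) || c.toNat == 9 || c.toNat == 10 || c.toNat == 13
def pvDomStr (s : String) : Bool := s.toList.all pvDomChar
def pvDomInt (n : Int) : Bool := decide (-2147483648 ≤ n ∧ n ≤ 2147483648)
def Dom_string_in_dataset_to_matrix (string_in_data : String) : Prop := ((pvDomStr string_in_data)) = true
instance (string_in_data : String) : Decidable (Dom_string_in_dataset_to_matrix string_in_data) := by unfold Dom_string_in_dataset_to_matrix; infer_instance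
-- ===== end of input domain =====

-- B sorts the word list once and scans it for runs of equal adjacent words instead of
-- A's defaultdict-count / set-dedup / sort-keys / lookup pipeline (alternative algorithm).


-- ===== PORT A =====
def string_in_dataset_to_matrix (string_in_data : String) : List (String × Int) :=
  let data_list_split := PySem.Str.split₀ string_in_data
  let word_counts := data_list_split.foldl (fun d w => d.modify w 0 (· + 1)) PySem.Dict.empty
  let data_list_singal := PySem.Set.ofList data_list_split
  let sorted_data_list := PySem.List.sorted data_list_singal (fun x => x)
  let matrix := sorted_data_list.map (fun w => (w, word_counts.getD w 0))
  (PySem.Dict.ofList matrix).items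

-- ===== PORT B =====
-- the outer while loop of Source B: consume one run of equal adjacent words per step
def bRuns (l : List String) : List (String × Int) :=
  match l with
  | [] => []
  | w :: t =>
      (w, 1 + ((t.takeWhile (fun x => x == w)).length : Int)) ::
        bRuns (t.dropWhile (fun x => x == w))
termination_by l.length
decreasing_by simpa using Nat.lt_succ_of_le (List.length_dropWhile_le _ t)

def string_in_dataset_to_matrix_alt (string_in_data : String) : List (String × Int) :=
  bRuns (PySem.List.sorted (PySem.Str.split₀ string_in_data) (fun x => x))

-- ===== PRECONDITION & SPEC =====
def Spec_string_in_dataset_to_matrix (string_in_data : String) (out : List (String × Int)) : Prop := out = string_in_dataset_to_matrix_alt string_in_data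
instance (string_in_data : String) (out : List (String × Int)) : Decidable (Spec_string_in_dataset_to_matrix string_in_data out) := by unfold Spec_string_in_dataset_to_matrix; infer_instance

-- ===== CLAIM (what is proved, stated in full; the proofs are below) =====
def Claim_equal_string_in_dataset_to_matrix : Prop := ∀ (string_in_data : String), Dom_string_in_dataset_to_matrix string_in_data → Spec_string_in_dataset_to_matrix string_in_data (string_in_dataset_to_matrix string_in_data)

-- ===== LEMMAS AND PROOFS =====

lemma mem_takeWhile_beq_eq {w x : String} {t : List String}
    (hx : x ∈ t.takeWhile (fun y => y == w)) : x = w := by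
  have := List.mem_takeWhile_imp hx
  simpa using this

lemma gt_of_mem_dropWhile_beq (w : String) :
    ∀ t : List String, t.Pairwise (· ≤ ·) → (∀ x ∈ t, w ≤ x) →
      ∀ x ∈ t.dropWhile (fun y => y == w), w < x := by
  intro t
  induction t with
  | nil => intro _ _ x hx; simp [List.dropWhile] at hx
  | cons a r ih =>
    intro hp hle x hx
    rcases List.pairwise_cons.mp hp with ⟨ha, hr⟩
    by_cases haw : a = w
    · subst haw
      rw [List.dropWhile_cons_of_pos (by simp)] at hx
      exact ih hr (fun y hy => ha y hy) x hx
    · rw [List.dropWhile_cons_of_neg (by simpa using haw)] at hx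
      have hwa : w < a :=
        lt_of_le_of_ne (hle a (List.mem_cons_self ..)) (fun h => haw h.symm)
      rcases List.mem_cons.mp hx with rfl | hx
      · exact hwa
      · exact lt_of_lt_of_le hwa (ha x hx)

lemma bRuns_spec : ∀ l : List String, l.Pairwise (· ≤ ·) →
    ((bRuns l).map Prod.fst).Pairwise (· < ·)
    ∧ (∀ w, w ∈ (bRuns l).map Prod.fst ↔ w ∈ l)
    ∧ bRuns l = ((bRuns l).map Prod.fst).map (fun w => (w, (l.count w : Int))) := by
  intro l
  induction l using bRuns.induct with
  | case1 => intro _; simp [bRuns]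
  | case2 w t ih =>
    intro hp
    rcases List.pairwise_cons.mp hp with ⟨hw, ht⟩
    set t1 := t.takeWhile (fun y => y == w) with ht1
    set t2 := t.dropWhile (fun y => y == w) with ht2
    have htsplit : t1 ++ t2 = t := List.takeWhile_append_dropWhile ..
    have ht2p : t2.Pairwise (· ≤ ·) := ht.sublist (List.dropWhile_sublist _)
    have hgt : ∀ x ∈ t2, w < x := gt_of_mem_dropWhile_beq w t ht hw
    have ht2mem : ∀ x ∈ t2, x ∈ t := fun x hx => (List.dropWhile_sublist _).mem hx
    obtain ⟨ihpw, ihmem, iheq⟩ := ih ht2p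
    have hKgt : ∀ v ∈ (bRuns t2).map Prod.fst, w < v := fun v hv => hgt v ((ihmem v).mp hv)
    have hcount1 : t1.count w = t1.length := by
      rw [List.count_eq_length]
      intro b hb; exact (mem_takeWhile_beq_eq hb).symm
    have hcount2 : t2.count w = 0 := by
      rw [List.count_eq_zero]
      intro hmem; exact lt_irrefl w (hgt w hmem)
    have hcountw : (w :: t).count w = 1 + t1.length := by
      rw [← htsplit, List.count_cons_self, List.count_append, hcount1, hcount2]
      omega
    have hcountv : ∀ v ∈ (bRuns t2).map Prod.fst, (w :: t).count v = t2.count v := by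
      intro v hv
      have hvt2 : v ∈ t2 := (ihmem v).mp hv
      have hvw : w < v := hgt v hvt2
      have hv1 : t1.count v = 0 := by
        rw [List.count_eq_zero]
        intro hmem
        exact absurd (mem_takeWhile_beq_eq hmem) (ne_of_gt hvw)
      rw [← htsplit, List.count_cons_of_ne (ne_of_gt hvw).symm, List.count_append, hv1]
      omega
    rw [bRuns]
    refine ⟨?_, ?_, ?_⟩
    · simp only [List.map_cons, List.pairwise_cons]
      exact ⟨hKgt, ihpw⟩
    · intro v
      simp only [List.map_cons, List.mem_cons]
      constructor
      · rintro (rfl | hv)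
        · exact Or.inl rfl
        · exact Or.inr (ht2mem v ((ihmem v).mp hv))
      · rintro (rfl | hv)
        · exact Or.inl rfl
        · rw [← htsplit] at hv
          rcases List.mem_append.mp hv with hv | hv
          · exact Or.inl (mem_takeWhile_beq_eq hv)
          · exact Or.inr ((ihmem v).mpr hv)
    · simp only [List.map_cons]
      refine List.cons_eq_cons.mpr ⟨?_, ?_⟩
      · have hct : List.count w t = t1.length := by
          rw [← htsplit, List.count_append, hcount1, hcount2]
          omega
        simp only [List.count_cons_self, hct, Prod.mk.injEq, true_and, ← ht1]
        push_cast
        omega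
      · rw [iheq]
        simp only [List.map_map, Function.comp_def]
        exact (List.map_congr_left (fun v hv => by
          rw [hcountv v.1 (List.mem_map_of_mem (f := Prod.fst) hv)])).symm

theorem string_in_dataset_to_matrix_spec : Claim_equal_string_in_dataset_to_matrix := by
  intro s _
  unfold Spec_string_in_dataset_to_matrix string_in_dataset_to_matrix string_in_dataset_to_matrix_alt
  set ws := PySem.Str.split₀ s with hws
  set l := PySem.List.sorted ws (fun x => x) with hl
  obtain ⟨hpw, hmem, heq⟩ := bRuns_spec l (PySem.List.sorted_pairwise ws (fun x => x))
  set K := (bRuns l).map Prod.fst with hK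
  -- A's counts are ws.count
  have hcounts : ∀ w : String,
      (ws.foldl (fun d w => d.modify w 0 (· + 1)) PySem.Dict.empty).getD w 0 = (ws.count w : Int) := by
    intro w
    rw [PySem.Dict.getD_foldl_modify_add_one]
    simp [PySem.Dict.getD_empty]
  -- A's sorted key list equals B's run keys
  have hKnodup : K.Nodup := hpw.imp ne_of_lt
  have hKperm : K.Perm (PySem.Set.ofList ws) := by
    rw [List.perm_ext_iff_of_nodup hKnodup (PySem.Set.nodup_ofList ws)]
    intro a
    rw [PySem.Set.mem_ofList, hmem a]
    exact List.Perm.mem_iff (PySem.List.sorted_perm ws (fun x => x) false)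
  have hkeys : PySem.List.sorted (PySem.Set.ofList ws) (fun x => x) = K :=
    PySem.List.sorted_eq_of_perm_of_pairwise_lt _ K (fun x => x) hKperm hpw
  have hlcount : ∀ v : String, l.count v = ws.count v :=
    fun v => (PySem.List.sorted_perm ws (fun x => x) false).count_eq v
  -- rewrite A's matrix
  have hmatrix :
      (PySem.List.sorted (PySem.Set.ofList ws) (fun x => x)).map
        (fun w => (w, (ws.foldl (fun d w => d.modify w 0 (· + 1)) PySem.Dict.empty).getD w 0))
      = K.map (fun w => (w, (l.count w : Int))) := by
    rw [hkeys]
    refine List.map_congr_left ?_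
    intro w _
    rw [hcounts w, hlcount w]
  simp only [hmatrix]
  -- dict() of a fresh-keyed assoc list keeps it unchanged
  have hfresh := PySem.Dict.items_foldl_insert_fresh
      (K.map (fun w => (w, (l.count w : Int)))) Prod.fst Prod.snd PySem.Dict.empty
      (by intro a _; exact PySem.Dict.contains_empty _)
      (by simpa [List.map_map, Function.comp_def] using hKnodup)
  rw [show (PySem.Dict.ofList (K.map (fun w => (w, (l.count w : Int))))).items
        = (List.foldl (fun d (a : String × Int) => d.insert a.1 a.2) PySem.Dict.empty
            (K.map (fun w => (w, (l.count w : Int))))).items from rfl]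
  rw [hfresh, heq]
  simp [List.map_map, Function.comp_def, PySem.Dict.empty]
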